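-- pv_equiv track=rewrite | github.com/malcolmsailor/efficient_rhythms | src/er_voice_leadings.py | _zip_voice_leadings
-- ===== SOURCE A (Python) =====
-- def _zip_voice_leadings(
--     chord_intervals,
--     chord_displacement,
--     non_chord_intervals,
--     non_chord_displacement,
--     pc_scale,
--     pc_chord,
-- ):
--
--     total_displacement = chord_displacement + non_chord_displacement
--
--     zipped_intervals = []
--
--     # This won't try every combination of chord and non-chord voice-leadings.
--     # That might lead to a combinatorial explosion...
--
--     if len(chord_intervals) != len(non_chord_intervals):
--         short_list = (
--             chord_intervals
--             if len(chord_intervals) < len(non_chord_intervals)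
--             else non_chord_intervals
--         )
--         long_list = (
--             chord_intervals
--             if len(chord_intervals) > len(non_chord_intervals)
--             else non_chord_intervals
--         )
--         i = 0
--         while len(short_list) < len(long_list):
--             short_list.append(short_list[i])
--             i += 1
--
--     for chord_voice_leading, non_chord_voice_leading in zip(
--         chord_intervals, non_chord_intervals
--     ):
--         chord_vl_i = non_chord_vl_i = 0
--         zipped_voice_leading = []
--         for pc in pc_scale:
--             if pc in pc_chord:
--                 zipped_voice_leading.append(chord_voice_leading[chord_vl_i])
--                 chord_vl_i += 1
--             else:
--                 zipped_voice_leading.append(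
--                     non_chord_voice_leading[non_chord_vl_i]
--                 )
--                 non_chord_vl_i += 1
--         zipped_intervals.append(zipped_voice_leading)
--
--     return zipped_intervals, total_displacement
-- ===== SOURCE B (Python) =====
-- # B: column-major construction. Pad the shorter interval list in place by extending it
-- # with a cyclic read of a snapshot; then build one COLUMN per scale pitch-class
-- # (a slice across all rows of the relevant interval list) and transpose the columns
-- # with zip(*...) to obtain the rows. A builds row by row with two counters per row.
-- # Like A, this mutates the shorter interval list in place (same cyclic padding).
-- def _zip_voice_leadings(
--     chord_intervals,
--     chord_displacement,
--     non_chord_intervals,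
--     non_chord_displacement,
--     pc_scale,
--     pc_chord,
-- ):
--     if len(chord_intervals) != len(non_chord_intervals):
--         if len(chord_intervals) < len(non_chord_intervals):
--             short_list, long_list = chord_intervals, non_chord_intervals
--         else:
--             short_list, long_list = non_chord_intervals, chord_intervals
--         base = short_list[:]
--         short_list.extend(
--             base[j % len(base)] for j in range(len(long_list) - len(base))
--         )
--
--     n_rows = len(chord_intervals)
--     columns = []
--     c = nc = 0
--     for pc in pc_scale:
--         if pc in pc_chord:
--             columns.append([row[c] for row in chord_intervals])
--             c += 1
--         else:
--             columns.append([row[nc] for row in non_chord_intervals])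
--             nc += 1
--
--     if columns:
--         zipped_intervals = [list(row) for row in zip(*columns)]
--     else:
--         zipped_intervals = [[] for _ in range(n_rows)]
--     return zipped_intervals, chord_displacement + non_chord_displacement
-- ===== Notes on version B (the rewrite author's own statement) =====
-- stated objective: alternative
-- what changed: B is column-major: it builds one column per scale pitch-class (a vertical slice across all interval rows) and transposes the columns with zip(*...) to get the rows, and pads the shorter list by extending it with a cyclic read of a snapshot, instead of A's row-major per-pair loop with two running counters and its grow-and-read-back while-loop padding.
import Mathlib
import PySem

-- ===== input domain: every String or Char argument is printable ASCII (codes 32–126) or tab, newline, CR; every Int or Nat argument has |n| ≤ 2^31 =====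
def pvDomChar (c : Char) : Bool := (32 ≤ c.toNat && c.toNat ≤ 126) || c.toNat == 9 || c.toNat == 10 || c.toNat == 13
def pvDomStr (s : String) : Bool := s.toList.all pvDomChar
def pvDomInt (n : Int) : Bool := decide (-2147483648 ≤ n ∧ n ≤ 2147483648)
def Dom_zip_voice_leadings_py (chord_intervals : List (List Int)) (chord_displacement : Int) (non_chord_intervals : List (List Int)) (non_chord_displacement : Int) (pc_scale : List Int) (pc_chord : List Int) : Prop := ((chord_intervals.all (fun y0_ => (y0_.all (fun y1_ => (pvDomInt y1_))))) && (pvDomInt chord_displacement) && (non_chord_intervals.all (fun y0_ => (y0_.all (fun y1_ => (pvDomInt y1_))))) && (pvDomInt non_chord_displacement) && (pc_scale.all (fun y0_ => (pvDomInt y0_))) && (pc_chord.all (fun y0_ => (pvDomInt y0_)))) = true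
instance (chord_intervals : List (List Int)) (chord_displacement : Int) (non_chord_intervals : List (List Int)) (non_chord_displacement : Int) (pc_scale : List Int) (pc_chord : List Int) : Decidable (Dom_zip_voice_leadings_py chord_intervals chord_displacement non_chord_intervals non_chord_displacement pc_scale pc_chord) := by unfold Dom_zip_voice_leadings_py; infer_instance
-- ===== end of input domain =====

-- B builds one column per scale pitch-class and transposes the columns (zip(*...)),
-- instead of A's row-major per-pair loop with two counters; padding is a cyclic extend
-- from a snapshot instead of A's grow-and-read-back while loop (objective: alternative).
-- Both Pythons pad the shorter interval list IN PLACE identically; the theorem is about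
-- the return value.

-- ===== PORT A =====
-- A's `while len(short_list) < len(long_list): short_list.append(short_list[i]); i += 1`
def padLoopA (short : List (List Int)) (i : Int) (target : Nat) : List (List Int) :=
  if short.length < target then
    padLoopA (short ++ [(PySem.List.pyGet? short i).getD []]) (i + 1) target
  else short
termination_by target - short.length
decreasing_by simp; omega

-- A's inner loop over pc_scale with the two counters
def rowA (cvl nvl : List Int) (pc_scale pc_chord : List Int) : List Int :=
  (pc_scale.foldl (fun (st : Int × Int × List Int) pc =>
      if pc ∈ pc_chord then
        (st.1 + 1, st.2.1, st.2.2 ++ [(PySem.List.pyGet? cvl st.1).getD 0])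
      else
        (st.1, st.2.1 + 1, st.2.2 ++ [(PySem.List.pyGet? nvl st.2.1).getD 0]))
    (0, 0, [])).2.2

def zip_voice_leadings_py (chord_intervals : List (List Int)) (chord_displacement : Int) (non_chord_intervals : List (List Int)) (non_chord_displacement : Int) (pc_scale : List Int) (pc_chord : List Int) : List (List Int) × Int :=
  let total_displacement := chord_displacement + non_chord_displacement
  let p : List (List Int) × List (List Int) :=
    if chord_intervals.length ≠ non_chord_intervals.length then
      if chord_intervals.length < non_chord_intervals.length then
        (padLoopA chord_intervals 0 non_chord_intervals.length, non_chord_intervals)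
      else
        (chord_intervals, padLoopA non_chord_intervals 0 chord_intervals.length)
    else (chord_intervals, non_chord_intervals)
  ((List.zip p.1 p.2).foldl
      (fun acc cn => acc ++ [rowA cn.1 cn.2 pc_scale pc_chord]) [],
   total_displacement)

-- ===== PORT B =====
-- B's padding: short.extend(base[j % len(base)] for j in range(len(long) - len(base)))
-- with base a snapshot of short
def padB (s : List (List Int)) (target : Nat) : List (List Int) :=
  s ++ (PySem.List.pyRange 0 ((target : Int) - (s.length : Int)) 1).map
    (fun j => (PySem.List.pyGet? s (PySem.Int.mod j (s.length : Int))).getD [])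

-- B's column loop: one column per scale pitch-class, sliced across all rows
def colsB (ci nci : List (List Int)) (pc_scale pc_chord : List Int) : List (List Int) :=
  (pc_scale.foldl (fun (st : Int × Int × List (List Int)) pc =>
      if pc ∈ pc_chord then
        (st.1 + 1, st.2.1,
         st.2.2 ++ [ci.map (fun row => (PySem.List.pyGet? row st.1).getD 0)])
      else
        (st.1, st.2.1 + 1,
         st.2.2 ++ [nci.map (fun row => (PySem.List.pyGet? row st.2.1).getD 0)]))
    (0, 0, [])).2.2

-- Python's zip(*columns): take heads of all columns until one is exhausted
def zipStar (cols : List (List Int)) : List (List Int) :=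
  match cols with
  | [] => []
  | c :: rest =>
    if h : c ≠ [] ∧ rest.all (fun l => !l.isEmpty) then
      (c :: rest).map (fun l => l.headD 0) :: zipStar (c.tail :: rest.map List.tail)
    else []
termination_by (cols.headD []).length
decreasing_by
  simp only [List.headD_cons]
  cases c with
  | nil => exact absurd rfl h.1
  | cons x xs => simp

def zip_voice_leadings_py_alt (chord_intervals : List (List Int)) (chord_displacement : Int) (non_chord_intervals : List (List Int)) (non_chord_displacement : Int) (pc_scale : List Int) (pc_chord : List Int) : List (List Int) × Int :=
  let p : List (List Int) × List (List Int) :=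
    if chord_intervals.length ≠ non_chord_intervals.length then
      if chord_intervals.length < non_chord_intervals.length then
        (padB chord_intervals non_chord_intervals.length, non_chord_intervals)
      else
        (chord_intervals, padB non_chord_intervals chord_intervals.length)
    else (chord_intervals, non_chord_intervals)
  let n_rows := p.1.length
  let columns := colsB p.1 p.2 pc_scale pc_chord
  ((if columns ≠ [] then zipStar columns
    else (List.range n_rows).map (fun _ => ([] : List Int))),
   chord_displacement + non_chord_displacement)

-- ===== PRECONDITION & SPEC =====
-- Pre_ excludes exactly the inputs on which the Python A raises IndexError: padding an
-- empty shorter list against a nonempty longer one, or a voice-leading row shorter than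
-- the number of (non-)chord pitch-classes it must supply.
def Pre_zip_voice_leadings_py (chord_intervals : List (List Int)) (chord_displacement : Int) (non_chord_intervals : List (List Int)) (non_chord_displacement : Int) (pc_scale : List Int) (pc_chord : List Int) : Prop :=
  (chord_intervals = [] ↔ non_chord_intervals = []) ∧
  (∀ r ∈ chord_intervals, (pc_scale.filter (fun pc => pc ∈ pc_chord)).length ≤ r.length) ∧
  (∀ r ∈ non_chord_intervals, (pc_scale.filter (fun pc => pc ∉ pc_chord)).length ≤ r.length)
instance (chord_intervals : List (List Int)) (chord_displacement : Int) (non_chord_intervals : List (List Int)) (non_chord_displacement : Int) (pc_scale : List Int) (pc_chord : List Int) : Decidable (Pre_zip_voice_leadings_py chord_intervals chord_displacement non_chord_intervals non_chord_displacement pc_scale pc_chord) := by unfold Pre_zip_voice_leadings_py; infer_instance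

def pvWitness_zip_voice_leadings_py : List (List Int) × Int × List (List Int) × Int × List Int × List Int :=
  ([[1, 2], [3, 4]], 1, [[5, 6]], 2, [0, 2, 4, 7], [0, 4])

def Spec_zip_voice_leadings_py (chord_intervals : List (List Int)) (chord_displacement : Int) (non_chord_intervals : List (List Int)) (non_chord_displacement : Int) (pc_scale : List Int) (pc_chord : List Int) (out : List (List Int) × Int) : Prop := out = zip_voice_leadings_py_alt chord_intervals chord_displacement non_chord_intervals non_chord_displacement pc_scale pc_chord
instance (chord_intervals : List (List Int)) (chord_displacement : Int) (non_chord_intervals : List (List Int)) (non_chord_displacement : Int) (pc_scale : List Int) (pc_chord : List Int) (out : List (List Int) × Int) : Decidable (Spec_zip_voice_leadings_py chord_intervals chord_displacement non_chord_intervals non_chord_displacement pc_scale pc_chord out) := by unfold Spec_zip_voice_leadings_py; infer_instance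

-- ===== CLAIM (what is proved, stated in full; the proofs are below) =====
def Claim_equal_zip_voice_leadings_py : Prop := ∀ (chord_intervals : List (List Int)) (chord_displacement : Int) (non_chord_intervals : List (List Int)) (non_chord_displacement : Int) (pc_scale : List Int) (pc_chord : List Int), Dom_zip_voice_leadings_py chord_intervals chord_displacement non_chord_intervals non_chord_displacement pc_scale pc_chord → Pre_zip_voice_leadings_py chord_intervals chord_displacement non_chord_intervals non_chord_displacement pc_scale pc_chord → Spec_zip_voice_leadings_py chord_intervals chord_displacement non_chord_intervals non_chord_displacement pc_scale pc_chord (zip_voice_leadings_py chord_intervals chord_displacement non_chord_intervals non_chord_displacement pc_scale pc_chord)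

-- ===== LEMMAS AND PROOFS =====

-- the common "plan" abstraction both loops are proved against
def planOf (pc_scale pc_chord : List Int) : List (Bool × Int) :=
  (pc_scale.foldl (fun (st : Int × Int × List (Bool × Int)) pc =>
      if pc ∈ pc_chord then (st.1 + 1, st.2.1, st.2.2 ++ [(true, st.1)])
      else (st.1, st.2.1 + 1, st.2.2 ++ [(false, st.2.1)]))
    (0, 0, [])).2.2

-- A's row loop equals a gather over the plan
lemma row_loop_eq (cvl nvl pc_chord : List Int) :
    ∀ (ps : List Int) (ci ni : Int) (accA : List Int) (accP : List (Bool × Int)),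
      accA = accP.map (fun p => (PySem.List.pyGet? (if p.1 then cvl else nvl) p.2).getD 0) →
      (ps.foldl (fun (st : Int × Int × List Int) pc =>
          if pc ∈ pc_chord then
            (st.1 + 1, st.2.1, st.2.2 ++ [(PySem.List.pyGet? cvl st.1).getD 0])
          else
            (st.1, st.2.1 + 1, st.2.2 ++ [(PySem.List.pyGet? nvl st.2.1).getD 0]))
        (ci, ni, accA)).2.2 =
      ((ps.foldl (fun (st : Int × Int × List (Bool × Int)) pc =>
          if pc ∈ pc_chord then (st.1 + 1, st.2.1, st.2.2 ++ [(true, st.1)])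
          else (st.1, st.2.1 + 1, st.2.2 ++ [(false, st.2.1)]))
        (ci, ni, accP)).2.2).map
          (fun p => (PySem.List.pyGet? (if p.1 then cvl else nvl) p.2).getD 0) := by
  intro ps
  induction ps with
  | nil => intro ci ni accA accP h; simpa using h
  | cons pc ps ih =>
    intro ci ni accA accP h
    by_cases hpc : pc ∈ pc_chord <;> simp only [List.foldl_cons, if_pos, hpc, ite_false]
    · exact ih (ci + 1) ni _ _ (by simp [h])
    · exact ih ci (ni + 1) _ _ (by simp [h])

lemma rowA_eq_plan (cvl nvl pc_scale pc_chord : List Int) :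
    rowA cvl nvl pc_scale pc_chord =
      (planOf pc_scale pc_chord).map
        (fun p => (PySem.List.pyGet? (if p.1 then cvl else nvl) p.2).getD 0) := by
  unfold rowA planOf
  exact row_loop_eq cvl nvl pc_chord pc_scale 0 0 [] [] rfl

-- B's column loop equals a column gather over the plan
lemma cols_loop_eq (ci nci : List (List Int)) (pc_chord : List Int) :
    ∀ (ps : List Int) (c n : Int) (accC : List (List Int)) (accP : List (Bool × Int)),
      accC = accP.map (fun p => (if p.1 then ci else nci).map
                (fun row => (PySem.List.pyGet? row p.2).getD 0)) →
      (ps.foldl (fun (st : Int × Int × List (List Int)) pc =>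
          if pc ∈ pc_chord then
            (st.1 + 1, st.2.1,
             st.2.2 ++ [ci.map (fun row => (PySem.List.pyGet? row st.1).getD 0)])
          else
            (st.1, st.2.1 + 1,
             st.2.2 ++ [nci.map (fun row => (PySem.List.pyGet? row st.2.1).getD 0)]))
        (c, n, accC)).2.2 =
      ((ps.foldl (fun (st : Int × Int × List (Bool × Int)) pc =>
          if pc ∈ pc_chord then (st.1 + 1, st.2.1, st.2.2 ++ [(true, st.1)])
          else (st.1, st.2.1 + 1, st.2.2 ++ [(false, st.2.1)]))
        (c, n, accP)).2.2).map
          (fun p => (if p.1 then ci else nci).map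
            (fun row => (PySem.List.pyGet? row p.2).getD 0)) := by
  intro ps
  induction ps with
  | nil => intro c n accC accP h; simpa using h
  | cons pc ps ih =>
    intro c n accC accP h
    by_cases hpc : pc ∈ pc_chord <;> simp only [List.foldl_cons, if_pos, hpc, ite_false]
    · exact ih (c + 1) n _ _ (by simp [h])
    · exact ih c (n + 1) _ _ (by simp [h])

lemma colsB_eq_plan (ci nci pc_scale pc_chord) :
    colsB ci nci pc_scale pc_chord =
      (planOf pc_scale pc_chord).map
        (fun p => (if p.1 then ci else nci).map
          (fun row => (PySem.List.pyGet? row p.2).getD 0)) := by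
  unfold colsB planOf
  exact cols_loop_eq ci nci pc_chord pc_scale 0 0 [] [] rfl

lemma planOf_length (pc_scale pc_chord : List Int) :
    (planOf pc_scale pc_chord).length = pc_scale.length := by
  unfold planOf
  suffices h : ∀ (ps : List Int) (c n : Int) (acc : List (Bool × Int)),
      ((ps.foldl (fun (st : Int × Int × List (Bool × Int)) pc =>
          if pc ∈ pc_chord then (st.1 + 1, st.2.1, st.2.2 ++ [(true, st.1)])
          else (st.1, st.2.1 + 1, st.2.2 ++ [(false, st.2.1)]))
        (c, n, acc)).2.2).length = acc.length + ps.length by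
    simpa using h pc_scale 0 0 []
  intro ps
  induction ps with
  | nil => intro c n acc; simp
  | cons pc ps ih =>
    intro c n acc
    by_cases hpc : pc ∈ pc_chord <;>
      simp only [List.foldl_cons, if_pos, hpc, ite_false] <;>
      rw [ih] <;> simp <;> omega

-- the cyclic element s[k % n] (as a total getD) that both paddings append
def cyc (s : List (List Int)) (k : Nat) : List Int := s.getD (k % s.length) []

lemma cyc_getElem (s : List (List Int)) (hs : s ≠ []) (k : Nat) :
    (s ++ (List.range k).map (cyc s))[k]? = some (cyc s k) := by
  have hn : 0 < s.length := List.length_pos_iff.mpr hs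
  by_cases hk : k < s.length
  · rw [List.getElem?_append_left hk, List.getElem?_eq_getElem hk]
    simp [cyc, Nat.mod_eq_of_lt hk, List.getD, List.getElem?_eq_getElem hk]
  · rw [not_lt] at hk
    have hlt : k - s.length < ((List.range k).map (cyc s)).length := by
      simp; omega
    rw [List.getElem?_append_right hk, List.getElem?_eq_getElem hlt]
    have hmod : (k - s.length) % s.length = k % s.length := by
      conv_rhs => rw [show k = (k - s.length) + s.length by omega]
      rw [Nat.add_mod_right]
    simp [cyc, hmod, List.getD]

-- A's padding loop computes the cyclic closed form
lemma padLoopA_closed (s : List (List Int)) (hs : s ≠ []) (t : Nat) :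
    ∀ (m k : Nat), t - (s.length + k) = m →
      padLoopA (s ++ (List.range k).map (cyc s)) (k : Int) t =
        s ++ (List.range (max k (t - s.length))).map (cyc s) := by
  intro m
  induction m with
  | zero =>
    intro k hm
    rw [padLoopA]
    have hlen : ¬ (s ++ (List.range k).map (cyc s)).length < t := by simp; omega
    rw [if_neg hlen]
    have hmax : max k (t - s.length) = k := by omega
    rw [hmax]
  | succ m ih =>
    intro k hm
    rw [padLoopA]
    have hlen : (s ++ (List.range k).map (cyc s)).length < t := by simp; omega
    rw [if_pos hlen]
    have hget : PySem.List.pyGet? (s ++ (List.range k).map (cyc s)) (k : Int)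
        = some (cyc s k) := by
      rw [PySem.List.pyGet?_natCast]; exact cyc_getElem s hs k
    rw [hget]
    have hstep : (s ++ (List.range k).map (cyc s)) ++ [(some (cyc s k)).getD []]
        = s ++ (List.range (k + 1)).map (cyc s) := by
      simp [List.range_succ]
    have hcast : (k : Int) + 1 = ((k + 1 : Nat) : Int) := by push_cast; ring
    simp only [List.length_append, List.length_map, List.length_range] at hlen
    have hmax : max (k + 1) (t - s.length) = max k (t - s.length) := by omega
    rw [hstep, hcast, ih (k + 1) (by omega), hmax]

-- B's padding computes the same closed form
lemma padB_closed (s : List (List Int)) (hs : s ≠ []) (t : Nat) :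
    padB s t = s ++ (List.range (t - s.length)).map (cyc s) := by
  have hn : 0 < s.length := List.length_pos_iff.mpr hs
  unfold padB
  rw [PySem.List.pyRange_one]
  have h1 : ((t : Int) - (s.length : Int) - 0).toNat = t - s.length := by omega
  rw [h1, List.map_map]
  congr 1
  apply List.map_congr_left
  intro k _
  have hmod : PySem.Int.mod (0 + (k : Int)) (s.length : Int)
      = ((k % s.length : Nat) : Int) := by
    rw [zero_add]; exact PySem.Int.mod_natCast k s.length
  simp only [Function.comp, hmod, PySem.List.pyGet?_natCast]
  have hlt : k % s.length < s.length := Nat.mod_lt _ hn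
  simp [cyc, List.getD, List.getElem?_eq_getElem hlt]

lemma pad_eq (s : List (List Int)) (hs : s ≠ []) (t : Nat) :
    padLoopA s 0 t = padB s t := by
  have h0 := padLoopA_closed s hs t (t - (s.length + 0)) 0 rfl
  simp at h0
  rw [padB_closed s hs t]
  simpa using h0

lemma padB_length (s : List (List Int)) (hs : s ≠ []) (t : Nat) (h : s.length ≤ t) :
    (padB s t).length = t := by
  rw [padB_closed s hs t]; simp; omega

-- zipStar on a nonempty list of equal-length columns is the index transpose
lemma zipStar_uniform :
    ∀ (r : Nat) (cols : List (List Int)), cols ≠ [] →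
      (∀ c ∈ cols, c.length = r) →
      zipStar cols = (List.range r).map (fun k => cols.map (fun c => c.getD k 0)) := by
  intro r
  induction r with
  | zero =>
    intro cols hne hlen
    obtain ⟨c, rest, rfl⟩ := List.exists_cons_of_ne_nil hne
    rw [zipStar]
    have hc : c = [] := List.eq_nil_of_length_eq_zero (hlen c (by simp))
    rw [dif_neg (by simp [hc])]
    simp
  | succ r ih =>
    intro cols hne hlen
    obtain ⟨c, rest, rfl⟩ := List.exists_cons_of_ne_nil hne
    rw [zipStar]
    have hall : c ≠ [] ∧ rest.all (fun l => !l.isEmpty) := by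
      constructor
      · intro h; have := hlen c (by simp); simp [h] at this
      · rw [List.all_eq_true]
        intro l hl
        have := hlen l (by simp [hl])
        simp
        intro h; simp [h] at this
    rw [dif_pos hall]
    have htails : c.tail :: rest.map List.tail = (c :: rest).map List.tail := by simp
    rw [htails, ih ((c :: rest).map List.tail) (by simp)
        (by intro l hl
            obtain ⟨x, hx, rfl⟩ := List.mem_map.mp hl
            have := hlen x hx
            simp [List.length_tail]; omega)]
    have hHead : ∀ l : List Int, l.headD 0 = l.getD 0 0 := by
      intro l; cases l <;> simp [List.getD]
    have hTail : ∀ (l : List Int) (k : Nat), l.tail.getD k 0 = l.getD (k + 1) 0 := by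
      intro l k; cases l <;> simp [List.getD]
    rw [List.range_succ_eq_map]
    simp only [List.map_cons, List.map_map, Function.comp_def, hHead, hTail,
      Nat.succ_eq_add_one]

-- the main body: given equal padded lengths, A's row fold equals B's transpose
lemma body_eq (p1 p2 : List (List Int)) (hlen : p1.length = p2.length)
    (ps pcc : List Int) :
    (List.zip p1 p2).foldl (fun acc cn => acc ++ [rowA cn.1 cn.2 ps pcc]) [] =
      (if colsB p1 p2 ps pcc ≠ [] then zipStar (colsB p1 p2 ps pcc)
       else (List.range p1.length).map (fun _ => ([] : List Int))) := by
  rw [PySem.List.foldl_append_singleton_eq_map]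
  simp only [List.nil_append]
  by_cases hps : ps = []
  · subst hps
    have hcols : colsB p1 p2 [] pcc = [] := rfl
    rw [hcols, if_neg (by simp)]
    have : ∀ cn ∈ List.zip p1 p2, rowA cn.1 cn.2 [] pcc = [] := by
      intro cn _; rfl
    rw [List.map_congr_left this]
    have hz : (List.zip p1 p2).length = p1.length := by
      simp [List.length_zip, hlen]
    rw [List.map_const', List.map_const', hz, List.length_range]
  · have hplanne : planOf ps pcc ≠ [] := by
      intro h
      have := planOf_length ps pcc
      rw [h] at this
      exact hps (List.eq_nil_of_length_eq_zero this.symm)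
    have hcolsne : colsB p1 p2 ps pcc ≠ [] := by
      rw [colsB_eq_plan]; simpa using hplanne
    rw [if_pos hcolsne, colsB_eq_plan]
    rw [zipStar_uniform p1.length _ (by simpa using hplanne)
        (by intro c hc
            obtain ⟨p, _, rfl⟩ := List.mem_map.mp hc
            cases p.1 <;> simp [hlen])]
    apply List.ext_getElem
    · simp [List.length_zip, hlen]
    · intro k h1 h2
      simp only [List.length_map, List.length_zip, hlen, min_self] at h1
      have hk1 : k < p1.length := by omega
      have hk2 : k < p2.length := by omega
      rw [List.getElem_map, List.getElem_map, List.getElem_range, List.getElem_zip]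
      rw [rowA_eq_plan, List.map_map]
      apply List.map_congr_left
      intro p _
      simp only [Function.comp]
      cases hp : p.1 <;> simp only [if_true, if_false, Bool.false_eq_true]
      · simp [List.getD, List.getElem?_eq_getElem hk2]
      · simp [List.getD, List.getElem?_eq_getElem hk1]

-- ===== VERDICT (by name: the statement is the Claim_ definition above) =====
theorem zip_voice_leadings_py_spec : Claim_equal_zip_voice_leadings_py := by
  intro ci cd ni nd ps pcc _hD hPre
  unfold Spec_zip_voice_leadings_py zip_voice_leadings_py zip_voice_leadings_py_alt
  obtain ⟨hiff, -, -⟩ := hPre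
  by_cases hne : ci.length ≠ ni.length
  · simp only [if_pos hne]
    by_cases hlt : ci.length < ni.length
    · have hci : ci ≠ [] := by
        intro h; subst h
        have := hiff.mp rfl
        simp [this] at hlt
      have hpl : (padB ci ni.length).length = ni.length :=
        padB_length ci hci ni.length (by omega)
      simp only [if_pos hlt, pad_eq ci hci]
      exact Prod.ext (body_eq _ _ (by rw [hpl]) ps pcc) rfl
    · have hni : ni ≠ [] := by
        intro h; subst h
        have := hiff.mpr rfl
        simp [this] at hne
      have hpl : (padB ni ci.length).length = ci.length :=
        padB_length ni hni ci.length (by omega)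
      simp only [if_neg hlt, pad_eq ni hni]
      exact Prod.ext (body_eq _ _ (by rw [hpl]) ps pcc) rfl
  · simp only [if_neg hne]
    push_neg at hne
    exact Prod.ext (body_eq _ _ hne ps pcc) rfl
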